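-- pv_equiv track=rewrite | github.com/calliope1/minecraft-inventory | inventory_search.py | drag_left
-- ===== SOURCE A (Python) =====
-- def empty_space(inv, full_inds=False):
--     if full_inds:
--         return [i for i, v in enumerate(inv) if not v]
--     return inv.count(0)
--
-- def drag_left(inv, act, n):
--     'Returns a new inventory and the size of the active slot after dragging left click accross n empty inventory slots.'
--     inv_out = inv.copy()
--     zero_inds = empty_space(inv_out, True)
--     delta = min(len(zero_inds), n, act)
--     if delta:
--         quotient, remainder = divmod(act, delta)
--         for i in range(delta):
--             inv_out[zero_inds[i]] += quotient + (1 if i < remainder else 0)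
--         return inv_out, 0
--     return inv_out, act
-- ===== SOURCE B (Python) =====
-- def drag_left(inv, act, n):
--     'Returns a new inventory and the size of the active slot after dragging left click accross n empty inventory slots.'
--     count = sum(1 for v in inv if not v)
--     delta = min(count, n, act)
--     if not delta:
--         return list(inv), act
--     quotient, remainder = divmod(act, delta)
--     out = []
--     j = 0
--     for v in inv:
--         if not v and j < delta:
--             out.append(quotient + (1 if j < remainder else 0))
--             j += 1
--         else:
--             out.append(v)
--     return out, 0
-- ===== Notes on version B (the rewrite author's own statement) =====
-- stated objective: simpler
-- what changed: B replaces A's build-an-index-table-then-iterate-it (enumerate to collect zero indices, then a range loop doing indexed in-place updates) with a single counting pass followed by one left-to-right fill scan that carries a counter of empty slots seen; no index list and no random-access writes.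
import Mathlib
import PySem

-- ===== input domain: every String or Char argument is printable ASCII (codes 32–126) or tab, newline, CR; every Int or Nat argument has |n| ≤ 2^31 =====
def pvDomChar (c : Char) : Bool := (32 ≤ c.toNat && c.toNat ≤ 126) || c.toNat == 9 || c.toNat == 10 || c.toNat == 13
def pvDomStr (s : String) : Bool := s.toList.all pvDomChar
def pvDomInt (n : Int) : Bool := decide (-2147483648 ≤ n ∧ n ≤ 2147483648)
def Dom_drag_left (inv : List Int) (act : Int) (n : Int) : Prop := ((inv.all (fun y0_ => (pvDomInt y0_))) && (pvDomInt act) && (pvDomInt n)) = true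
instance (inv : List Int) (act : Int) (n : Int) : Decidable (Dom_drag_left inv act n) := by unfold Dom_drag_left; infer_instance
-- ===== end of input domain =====

-- B replaces A's "collect the zero indices, then loop over that index table doing in-place
-- indexed updates" with a count-the-zeros pass plus one left-to-right fill scan carrying a
-- counter of empty slots seen; objective: simpler (no index list, no random-access writes).

-- ===== PORT A =====
-- helper empty_space(inv, True): indices of falsy (== 0) slots
def emptySpaceInds (inv : List Int) : List Int :=
  (PySem.List.enumerate inv 0).filterMap (fun p => if p.2 == 0 then some p.1 else none)

def drag_left (inv : List Int) (act : Int) (n : Int) : List Int × Int :=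
  let inv_out := inv
  let zero_inds := emptySpaceInds inv_out
  let delta := min (min ((zero_inds.length : Int)) n) act
  if delta ≠ 0 then
    let q := PySem.Int.floordiv act delta
    let r := PySem.Int.mod act delta
    -- the loop indices zero_inds[i] are provably in range (i < delta ≤ len zero_inds,
    -- entries < len inv), so the total forms pyGetD/pySetD are exact here
    let out := (PySem.List.pyRange 0 delta 1).foldl
      (fun acc i =>
        let idx := PySem.List.pyGetD zero_inds i 0
        PySem.List.pySetD acc idx (PySem.List.pyGetD acc idx 0 + (q + (if i < r then 1 else 0)))) inv_out
    (out, 0)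
  else (inv_out, act)

-- ===== PORT B =====
def drag_left_alt (inv : List Int) (act : Int) (n : Int) : List Int × Int :=
  let count : Int := inv.foldl (fun c v => if v == 0 then c + 1 else c) 0
  let delta := min (min count n) act
  if delta = 0 then (inv, act)
  else
    let q := PySem.Int.floordiv act delta
    let r := PySem.Int.mod act delta
    let st := inv.foldl
      (fun (st : List Int × Int) v =>
        if v == 0 && decide (st.2 < delta) then (st.1 ++ [q + (if st.2 < r then 1 else 0)], st.2 + 1)
        else (st.1 ++ [v], st.2)) (([] : List Int), (0 : Int))
    (st.1, 0)

-- ===== PRECONDITION & SPEC =====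
def Spec_drag_left (inv : List Int) (act : Int) (n : Int) (out : List Int × Int) : Prop := out = drag_left_alt inv act n
instance (inv : List Int) (act : Int) (n : Int) (out : List Int × Int) : Decidable (Spec_drag_left inv act n out) := by unfold Spec_drag_left; infer_instance

-- ===== CLAIM (what is proved, stated in full; the proofs are below) =====
def Claim_equal_drag_left : Prop := ∀ (inv : List Int) (act : Int) (n : Int), Dom_drag_left inv act n → Spec_drag_left inv act n (drag_left inv act n)

-- ===== LEMMAS AND PROOFS =====

-- proof-side: the fill scan as a structural recursion (the common normal form of both loops)
def fillSpec (d q r : Int) : List Int → Int → List Int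
  | [], _ => []
  | v :: rest, j =>
    if v = 0 ∧ j < d then (q + (if j < r then 1 else 0)) :: fillSpec d q r rest (j + 1)
    else v :: fillSpec d q r rest j

-- proof-side: zero indices with a general enumerate start
def zIdx (l : List Int) (s : Int) : List Int :=
  (PySem.List.enumerate l s).filterMap (fun p => if p.2 == 0 then some p.1 else none)

-- proof-side: A's loop as a recursion over the (taken) index list
def updList (q r d : Int) (out : List Int) (inds : List Int) (j : Int) : List Int :=
  match inds with
  | [] => out
  | idx :: rest =>
    updList q r d
      (PySem.List.pySetD out idx (PySem.List.pyGetD out idx 0 + (q + (if j < r then 1 else 0))))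
      rest (j + 1)

lemma zIdx_nil (s : Int) : zIdx [] s = [] := rfl

lemma zIdx_cons (x : Int) (xs : List Int) (s : Int) :
    zIdx (x :: xs) s = (if x = 0 then [s] else []) ++ zIdx xs (s + 1) := by
  simp [zIdx, PySem.List.enumerate_cons]
  split_ifs with h <;> simp [h]

lemma zIdx_shift (l : List Int) (s : Int) : zIdx l (s + 1) = (zIdx l s).map (· + 1) := by
  induction l generalizing s with
  | nil => rfl
  | cons x xs ih =>
    rw [zIdx_cons, zIdx_cons, ih (s + 1)]
    split_ifs <;> simp

lemma zIdx_len_aux (l : List Int) :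
    ∀ (s c : Int), l.foldl (fun c v => if v == 0 then c + 1 else c) c = c + ((zIdx l s).length : Int) := by
  induction l with
  | nil => simp [zIdx_nil]
  | cons x xs ih =>
    intro s c
    rw [List.foldl_cons, zIdx_cons]
    by_cases hx : x = 0
    · rw [if_pos (by simp [hx]), ih (s + 1) (c + 1)]
      simp [hx]; omega
    · rw [if_neg (by simp [hx]), ih (s + 1) c]
      simp [hx]

lemma zIdx_len (l : List Int) (s : Int) :
    ((zIdx l s).length : Int) = l.foldl (fun c v => if v == 0 then c + 1 else c) 0 := by
  rw [zIdx_len_aux l s 0, zero_add]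

lemma zIdx_mem_le (l : List Int) (s : Int) : ∀ i ∈ zIdx l s, s ≤ i := by
  induction l generalizing s with
  | nil => simp [zIdx_nil]
  | cons x xs ih =>
    intro i hi
    rw [zIdx_cons] at hi
    rcases List.mem_append.1 hi with h | h
    · split_ifs at h <;> simp_all
    · have := ih (s + 1) i h; omega

lemma fillSpec_of_le (d q r : Int) (l : List Int) (j : Int) (h : d ≤ j) :
    fillSpec d q r l j = l := by
  induction l generalizing j with
  | nil => rfl
  | cons x xs ih => simp [fillSpec, ih, h]

lemma updList_shift (q r d : Int) (y : Int) (ys : List Int) (inds : List Int) (j : Int)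
    (h : ∀ i ∈ inds, 0 ≤ i) :
    updList q r d (y :: ys) (inds.map (· + 1)) j = y :: updList q r d ys inds j := by
  induction inds generalizing ys j with
  | nil => rfl
  | cons idx rest ih =>
    have h0 : (0 : Int) ≤ idx := h idx (List.mem_cons_self)
    have h1 : (idx + 1).toNat = idx.toNat + 1 := by omega
    simp only [List.map_cons, updList]
    rw [PySem.List.pySetD_of_nonneg _ _ (by omega : (0:Int) ≤ idx + 1),
      PySem.List.pyGetD_of_nonneg _ _ (by omega : (0:Int) ≤ idx + 1),
      PySem.List.pySetD_of_nonneg _ _ h0, PySem.List.pyGetD_of_nonneg _ _ h0,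
      h1, List.set_cons_succ, List.getD_cons_succ]
    exact ih _ _ (fun i hi => h i (List.mem_cons_of_mem _ hi))

lemma updList_eq_fillSpec (q r d : Int) (l : List Int) :
    ∀ (j : Int), 0 ≤ j →
    updList q r d l ((zIdx l 0).take (d - j).toNat) j = fillSpec d q r l j := by
  induction l with
  | nil => simp [zIdx_nil, updList, fillSpec]
  | cons x xs ih =>
    intro j hj
    have hsub : ∀ (m : Nat), ∀ i ∈ (zIdx xs 0).take m, (0:Int) ≤ i :=
      fun m i hi => zIdx_mem_le xs 0 i (List.take_subset m _ hi)
    rw [zIdx_cons, (by simpa using zIdx_shift xs 0 : zIdx xs (0 + 1) = (zIdx xs 0).map (· + 1))]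
    by_cases hx : x = 0
    · by_cases hjd : j < d
      · have hk : (d - j).toNat = ((d - (j + 1)).toNat) + 1 := by omega
        rw [hx, if_pos rfl, List.singleton_append, hk, List.take_succ_cons]
        simp only [updList]
        rw [PySem.List.pySetD_of_nonneg _ _ (le_refl (0:Int)),
          PySem.List.pyGetD_of_nonneg _ _ (le_refl (0:Int))]
        simp only [Int.toNat_zero, List.getD_cons_zero, List.set_cons_zero]
        rw [← List.map_take, updList_shift q r d _ xs _ _ (hsub _), ih (j + 1) (by omega)]
        simp [fillSpec, hjd]
      · have hk : (d - j).toNat = 0 := by omega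
        simp [hx, hk, updList, fillSpec_of_le d q r _ _ (by omega : d ≤ j)]
    · rw [if_neg hx, List.nil_append, ← List.map_take,
        updList_shift q r d x xs _ j (hsub _), ih j hj]
      simp [fillSpec, hx]

lemma range_fold_eq_updList (q r d : Int) (zero_inds : List Int)
    (hd : d ≤ (zero_inds.length : Int)) :
    ∀ (k : Nat) (j : Int) (out : List Int), 0 ≤ j → (d - j).toNat = k →
    (PySem.List.pyRange j d 1).foldl
      (fun acc i =>
        PySem.List.pySetD acc (PySem.List.pyGetD zero_inds i 0)
          (PySem.List.pyGetD acc (PySem.List.pyGetD zero_inds i 0) 0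
            + (q + (if i < r then 1 else 0)))) out
    = updList q r d out ((zero_inds.drop j.toNat).take k) j := by
  intro k
  induction k with
  | zero =>
    intro j out hj hk
    rw [PySem.List.pyRange_one_eq_nil (by omega : d ≤ j)]
    simp [updList]
  | succ k ih =>
    intro j out hj hk
    have hjd : j < d := by omega
    have hjl : j.toNat < zero_inds.length := by omega
    rw [PySem.List.pyRange_one_cons hjd, List.foldl_cons,
      List.drop_eq_getElem_cons hjl, List.take_succ_cons]
    have hget : PySem.List.pyGetD zero_inds j 0 = zero_inds[j.toNat] :=
      PySem.List.pyGetD_eq_getElem _ _ hj (by exact_mod_cast (by omega : j < (zero_inds.length : Int)))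
    simp only [hget, updList]
    rw [ih (j + 1) _ (by omega) (by omega),
      (by omega : (j + 1).toNat = j.toNat + 1)]

lemma bfold_eq_fillSpec (d q r : Int) (l : List Int) :
    ∀ (acc : List Int) (j : Int),
    (l.foldl
      (fun (st : List Int × Int) v =>
        if v == 0 && decide (st.2 < d) then (st.1 ++ [q + (if st.2 < r then 1 else 0)], st.2 + 1)
        else (st.1 ++ [v], st.2)) (acc, j)).1 = acc ++ fillSpec d q r l j := by
  induction l with
  | nil => simp [fillSpec]
  | cons x xs ih =>
    intro acc j
    rw [List.foldl_cons]
    by_cases hx : x = 0 <;> by_cases hj : j < d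
    · rw [if_pos (by simp [hx, hj]), ih]
      simp [fillSpec, hx, hj, List.append_assoc]
    · rw [if_neg (by simp [hj]), ih]
      simp [fillSpec, hx, hj, List.append_assoc]
    · rw [if_neg (by simp [hx]), ih]
      simp [fillSpec, hx, List.append_assoc]
    · rw [if_neg (by simp [hx]), ih]
      simp [fillSpec, hx, List.append_assoc]

-- ===== VERDICT (by name: the statement is the Claim_ definition above) =====
lemma emptySpaceInds_eq (l : List Int) : emptySpaceInds l = zIdx l 0 := rfl

theorem drag_left_spec : Claim_equal_drag_left := by
  intro inv act n _
  unfold Spec_drag_left drag_left drag_left_alt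
  simp only [emptySpaceInds_eq, ← zIdx_len inv 0]
  by_cases hd : min (min (((zIdx inv 0).length : Int)) n) act = 0
  · simp [hd]
  · rw [if_pos hd, if_neg hd]
    simp only [Prod.mk.injEq]
    refine ⟨?_, by trivial⟩
    have hlen : min (min (((zIdx inv 0).length : Int)) n) act ≤ ((zIdx inv 0).length : Int) :=
      le_trans (min_le_left _ _) (min_le_left _ _)
    have hA := range_fold_eq_updList
      (PySem.Int.floordiv act (min (min (((zIdx inv 0).length : Int)) n) act))
      (PySem.Int.mod act (min (min (((zIdx inv 0).length : Int)) n) act))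
      (min (min (((zIdx inv 0).length : Int)) n) act) (zIdx inv 0) hlen
      ((min (min (((zIdx inv 0).length : Int)) n) act) - 0).toNat 0 inv (le_refl 0) rfl
    rw [bfold_eq_fillSpec _ _ _ inv [] 0, List.nil_append]
    exact hA.trans (updList_eq_fillSpec _ _ _ inv 0 (le_refl 0))
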